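-- pv_equiv track=rewrite | github.com/se348/A2SV-programming | 0498-diagonal-traverse/0498-diagonal-traverse.py | findNumsWithSum
-- ===== SOURCE A (Python) =====
-- def findNumsWithSum(total, rows, cols, up):
--
--     res= []
--
--     if up:
--         for j in range(rows-1, -1,-1):
--             col = total - j
--             if col > cols-1 or col < 0:
--                 continue
--             res.append([j, col])
--
--     else:
--         for j in range(rows):
--             col = total - j
--             if col < 0 or col > cols - 1:
--                 continue
--             res.append([j, col])
--
--
--     return res
-- ===== SOURCE B (Python) =====
-- def findNumsWithSum(total, rows, cols, up):
--     lo = max(0, total - cols + 1)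
--     hi = min(rows - 1, total)
--     if up:
--         return [[j, total - j] for j in range(hi, lo - 1, -1)]
--     return [[j, total - j] for j in range(lo, hi + 1)]
-- ===== Notes on version B (the rewrite author's own statement) =====
-- stated objective: faster
-- what changed: B computes the valid j-interval [max(0,total-cols+1), min(rows-1,total)] in closed form and emits only the cells in it, instead of scanning all rows and filtering.
import Mathlib
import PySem

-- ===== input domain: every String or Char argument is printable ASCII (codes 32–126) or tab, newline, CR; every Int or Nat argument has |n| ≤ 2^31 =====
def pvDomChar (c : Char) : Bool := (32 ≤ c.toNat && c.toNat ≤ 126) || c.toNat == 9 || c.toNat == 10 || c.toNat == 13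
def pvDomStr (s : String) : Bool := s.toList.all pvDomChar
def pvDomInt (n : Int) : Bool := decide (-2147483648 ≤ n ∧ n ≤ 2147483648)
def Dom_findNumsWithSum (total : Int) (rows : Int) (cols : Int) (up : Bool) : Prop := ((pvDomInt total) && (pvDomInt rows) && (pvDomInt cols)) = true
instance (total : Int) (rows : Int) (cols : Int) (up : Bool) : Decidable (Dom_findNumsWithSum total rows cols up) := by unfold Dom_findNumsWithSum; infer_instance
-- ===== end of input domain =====

-- B replaces A's scan over all rows (filtering each j) by the closed-form valid
-- j-interval [max(0,total-cols+1), min(rows-1,total)], emitting only the output cells.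

-- ===== PORT A =====
def findNumsWithSum (total : Int) (rows : Int) (cols : Int) (up : Bool) : List (List Int) :=
  if up then
    (PySem.List.pyRange (rows - 1) (-1) (-1)).foldl
      (fun res j =>
        let col := total - j
        if col > cols - 1 ∨ col < 0 then res else res ++ [[j, col]]) []
  else
    (PySem.List.pyRange 0 rows 1).foldl
      (fun res j =>
        let col := total - j
        if col < 0 ∨ col > cols - 1 then res else res ++ [[j, col]]) []

-- ===== PORT B =====
def findNumsWithSum_alt (total : Int) (rows : Int) (cols : Int) (up : Bool) : List (List Int) :=
  let lo := max 0 (total - cols + 1)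
  let hi := min (rows - 1) total
  if up then
    (PySem.List.pyRange hi (lo - 1) (-1)).map (fun j => [j, total - j])
  else
    (PySem.List.pyRange lo (hi + 1) 1).map (fun j => [j, total - j])

-- ===== PRECONDITION & SPEC =====
def Spec_findNumsWithSum (total : Int) (rows : Int) (cols : Int) (up : Bool) (out : List (List Int)) : Prop := out = findNumsWithSum_alt total rows cols up
instance (total : Int) (rows : Int) (cols : Int) (up : Bool) (out : List (List Int)) : Decidable (Spec_findNumsWithSum total rows cols up out) := by unfold Spec_findNumsWithSum; infer_instance

-- ===== CLAIM (what is proved, stated in full; the proofs are below) =====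
def Claim_equal_findNumsWithSum : Prop := ∀ (total : Int) (rows : Int) (cols : Int) (up : Bool), Dom_findNumsWithSum total rows cols up → Spec_findNumsWithSum total rows cols up (findNumsWithSum total rows cols up)

-- ===== LEMMAS AND PROOFS =====

-- filtering an ascending unit range by an interval test gives the clipped range
theorem pv_filter_pyRange_interval (a b c d : Int) :
    (PySem.List.pyRange a b 1).filter (fun j => decide (c ≤ j ∧ j ≤ d)) =
      PySem.List.pyRange (max a c) (min b (d + 1)) 1 := by
  refine List.Perm.eq_of_pairwise (le := (· < ·)) (fun x y _ _ h1 h2 => absurd h2 (by omega))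
    ((PySem.List.pairwise_lt_pyRange_one a b).sublist List.filter_sublist)
    (PySem.List.pairwise_lt_pyRange_one _ _) ?_
  rw [List.perm_ext_iff_of_nodup ((PySem.List.nodup_pyRange_one a b).filter _)
      (PySem.List.nodup_pyRange_one _ _)]
  intro x
  simp [List.mem_filter, PySem.List.mem_pyRange_one]
  omega

theorem pv_core (total rows cols : Int) :
    (PySem.List.pyRange 0 rows 1).filter
        (fun j => decide (¬(total - j > cols - 1 ∨ total - j < 0))) =
      PySem.List.pyRange (max 0 (total - cols + 1)) (min (rows - 1) total + 1) 1 := by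
  have h1 : (PySem.List.pyRange 0 rows 1).filter
        (fun j => decide (¬(total - j > cols - 1 ∨ total - j < 0))) =
      (PySem.List.pyRange 0 rows 1).filter
        (fun j => decide (total - cols + 1 ≤ j ∧ j ≤ total)) := by
    apply List.filter_congr
    intro x _
    rw [decide_eq_decide]
    omega
  have h2 : min (rows - 1) total + 1 = min rows (total + 1) := by omega
  rw [h1, h2, pv_filter_pyRange_interval]

theorem pv_main (total rows cols : Int) (up : Bool) :
    findNumsWithSum total rows cols up = findNumsWithSum_alt total rows cols up := by
  unfold findNumsWithSum findNumsWithSum_alt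
  have hfun : ∀ (P : Int → Prop) [DecidablePred P],
      (fun (res : List (List Int)) j =>
          if P j then res else res ++ [[j, total - j]]) =
        (fun res j => if ¬ P j then res ++ [[j, total - j]] else res) := by
    intro P _; funext res j; rw [ite_not]
  cases up
  · simp only [if_neg Bool.false_ne_true]
    rw [hfun (fun j => total - j < 0 ∨ total - j > cols - 1),
      PySem.List.foldl_append_ite
        (p := fun j => ¬(total - j < 0 ∨ total - j > cols - 1))
        (f := fun j => [j, total - j])]
    rw [show (fun j => decide (¬(total - j < 0 ∨ total - j > cols - 1))) =
          (fun j => decide (¬(total - j > cols - 1 ∨ total - j < 0))) from by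
        funext j; rw [decide_eq_decide]; tauto]
    rw [pv_core total rows cols]
    simp
  · simp only [if_pos rfl]
    rw [hfun (fun j => total - j > cols - 1 ∨ total - j < 0),
      PySem.List.foldl_append_ite
        (p := fun j => ¬(total - j > cols - 1 ∨ total - j < 0))
        (f := fun j => [j, total - j])]
    rw [PySem.List.pyRange_neg_one_eq_reverse, PySem.List.pyRange_neg_one_eq_reverse]
    rw [show (-1 : Int) + 1 = 0 from by norm_num, show rows - 1 + 1 = rows from by omega,
        show max 0 (total - cols + 1) - 1 + 1 = max 0 (total - cols + 1) from by omega]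
    rw [List.filter_reverse, pv_core total rows cols, List.map_reverse]
    simp

-- ===== VERDICT (by name: the statement is the Claim_ definition above) =====
theorem findNumsWithSum_spec : Claim_equal_findNumsWithSum := by
  intro total rows cols up _
  unfold Spec_findNumsWithSum
  exact pv_main total rows cols up
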